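-- pv_equiv track=rewrite | github.com/907-bot/Job-Application-Agent | src/customizer.py | _select_relevant_experience
-- ===== SOURCE A (Python) =====
-- from typing import Dict, List
--
-- def _select_relevant_experience(
--
--     experience_details: List[str],
--     job_skills: List[str]
-- ) -> List[str]:
--     """Select most relevant experience bullets"""
--
--     # Score each experience detail
--     scored_experiences = []
--     job_skills_lower = set(s.lower() for s in job_skills)
--
--     for exp in experience_details:
--         exp_lower = exp.lower()
--         score = sum(1 for skill in job_skills_lower if skill in exp_lower)
--         scored_experiences.append((score, exp))
--
--     # Sort by score (descending) and return top experiences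
--     scored_experiences.sort(reverse=True, key=lambda x: x[0])
--
--     return [exp for score, exp in scored_experiences[:4]]
-- ===== SOURCE B (Python) =====
-- from typing import Dict, List
--
-- def _select_relevant_experience(
--     experience_details: List[str],
--     job_skills: List[str]
-- ) -> List[str]:
--     """Select most relevant experience bullets (bucket sort by score)."""
--     skills = set(s.lower() for s in job_skills)
--
--     buckets = {}
--     max_score = 0
--     for exp in experience_details:
--         exp_lower = exp.lower()
--         score = sum(1 for skill in skills if skill in exp_lower)
--         buckets[score] = buckets.get(score, []) + [exp]
--         if max_score < score:
--             max_score = score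
--
--     result = []
--     for s in range(max_score, -1, -1):
--         result = result + buckets.get(s, [])
--     return result[:4]
-- ===== Notes on version B (the rewrite author's own statement) =====
-- stated objective: alternative
-- what changed: Replaces the comparison sort of (score, exp) tuples by a bucket sort: a dict mapping score to its bullets appended in input order, walked from the running maximum score down to 0, then sliced to 4.
import Mathlib
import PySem

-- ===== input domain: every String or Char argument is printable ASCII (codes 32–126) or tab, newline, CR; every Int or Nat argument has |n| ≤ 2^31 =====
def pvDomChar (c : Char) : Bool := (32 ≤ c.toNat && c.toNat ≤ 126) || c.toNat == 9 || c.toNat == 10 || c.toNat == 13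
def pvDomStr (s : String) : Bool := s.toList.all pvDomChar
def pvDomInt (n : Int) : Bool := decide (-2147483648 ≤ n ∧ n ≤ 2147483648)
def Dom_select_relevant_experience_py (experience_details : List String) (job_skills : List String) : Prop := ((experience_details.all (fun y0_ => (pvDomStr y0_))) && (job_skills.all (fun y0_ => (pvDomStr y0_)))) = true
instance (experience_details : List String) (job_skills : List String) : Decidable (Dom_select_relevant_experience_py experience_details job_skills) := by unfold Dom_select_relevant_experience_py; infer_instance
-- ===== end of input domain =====

-- B replaces A's comparison sort of (score, exp) pairs by a bucket sort: a dict score → bullets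
-- (appended in input order) walked from the running max score down to 0; same return value, alternative algorithm.

-- shared scoring helper: sum(1 for skill in skills if skill in exp_lower), identical in both Pythons
def pvScoreOf (skills : List String) (exp_lower : String) : Int :=
  (skills.map (fun skill => if PySem.Str.isIn skill exp_lower then (1 : Int) else 0)).sum

-- ===== PORT A =====
def select_relevant_experience_py (experience_details : List String) (job_skills : List String) : List String :=
  let job_skills_lower := PySem.Set.ofList (job_skills.map (fun s => PySem.Str.lower s))
  let scored_experiences := experience_details.foldl
    (fun acc exp => acc ++ [(pvScoreOf job_skills_lower (PySem.Str.lower exp), exp)])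
    ([] : List (Int × String))
  (PySem.List.slice (PySem.List.sorted scored_experiences (fun x => x.1) true) none (some 4)).map
    (fun p => p.2)

-- ===== PORT B =====
def select_relevant_experience_py_alt (experience_details : List String) (job_skills : List String) : List String :=
  let skills := PySem.Set.ofList (job_skills.map (fun s => PySem.Str.lower s))
  let st := experience_details.foldl
    (fun (st : PySem.Dict Int (List String) × Int) exp =>
      let score := pvScoreOf skills (PySem.Str.lower exp)
      (st.1.insert score (st.1.getD score [] ++ [exp]),
       if st.2 < score then score else st.2))
    (PySem.Dict.empty, 0)
  let result := (PySem.List.pyRange st.2 (-1) (-1)).foldl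
    (fun acc s => acc ++ st.1.getD s []) ([] : List String)
  PySem.List.slice result none (some 4)

-- ===== PRECONDITION & SPEC =====
def Spec_select_relevant_experience_py (experience_details : List String) (job_skills : List String) (out : List String) : Prop := out = select_relevant_experience_py_alt experience_details job_skills
instance (experience_details : List String) (job_skills : List String) (out : List String) : Decidable (Spec_select_relevant_experience_py experience_details job_skills out) := by unfold Spec_select_relevant_experience_py; infer_instance

-- ===== CLAIM (what is proved, stated in full; the proofs are below) =====
def Claim_equal_select_relevant_experience_py : Prop := ∀ (experience_details : List String) (job_skills : List String), Dom_select_relevant_experience_py experience_details job_skills → Spec_select_relevant_experience_py experience_details job_skills (select_relevant_experience_py experience_details job_skills)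

-- ===== LEMMAS AND PROOFS =====

-- descending bucket concatenation: pvFL g n = g (n-1) ++ g (n-2) ++ … ++ g 0
def pvFL {α : Type} (g : Int → List α) : Nat → List α
  | 0 => []
  | n + 1 => g n ++ pvFL g n

theorem pv_score_nonneg (skills : List String) (s : String) : 0 ≤ pvScoreOf skills s := by
  apply List.sum_nonneg
  intro x hx
  rcases List.mem_map.mp hx with ⟨sk, _, rfl⟩
  split <;> omega

-- the pair-state foldl of B splits into the dict foldl and the max foldl
theorem pv_foldl_pair {α β γ : Type} (f : β → α → β) (g : γ → α → γ) :
    ∀ (l : List α) (b : β) (c : γ),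
      l.foldl (fun st x => (f st.1 x, g st.2 x)) (b, c) = (l.foldl f b, l.foldl g c) := by
  intro l
  induction l with
  | nil => intro b c; rfl
  | cons x t ih => intro b c; simpa using ih (f b x) (g c x)

-- the dict bucket for score s collects exactly the inputs with that score, in order
theorem pv_bucket {α : Type} (k : α → Int) :
    ∀ (l : List α) (d : PySem.Dict Int (List α)) (s : Int),
      (l.foldl (fun d x => d.insert (k x) (d.getD (k x) [] ++ [x])) d).getD s [] =
        d.getD s [] ++ l.filter (fun x => k x == s) := by
  intro l
  induction l with
  | nil => intro d s; simp
  | cons x t ih =>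
    intro d s
    simp only [List.foldl_cons, List.filter_cons]
    rw [ih]
    rw [PySem.Dict.getD_insert]
    by_cases h : s = k x
    · subst h; simp
    · have : (k x == s) = false := by simp [Ne.symm h]
      simp [h, this]

theorem pv_le_foldl_max {α : Type} (k : α → Int) :
    ∀ (l : List α) (a : Int), a ≤ l.foldl (fun m x => if m < k x then k x else m) a := by
  intro l
  induction l with
  | nil => intro a; simp
  | cons x t ih =>
    intro a
    simp only [List.foldl_cons]
    have h1 : a ≤ (if a < k x then k x else a) := by split <;> omega
    exact le_trans h1 (ih _)

theorem pv_mem_le_foldl_max {α : Type} (k : α → Int) :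
    ∀ (l : List α) (a : Int) (x : α), x ∈ l →
      k x ≤ l.foldl (fun m x => if m < k x then k x else m) a := by
  intro l
  induction l with
  | nil => intro a x hx; simp at hx
  | cons y t ih =>
    intro a x hx
    simp only [List.foldl_cons]
    rcases List.mem_cons.mp hx with rfl | hx
    · have h1 : k x ≤ (if a < k x then k x else a) := by split <;> omega
      exact le_trans h1 (pv_le_foldl_max k t _)
    · exact ih _ x hx

theorem pv_pyRange_countdown (m : Int) (h : 0 ≤ m) :
    PySem.List.pyRange m (-1) (-1) = m :: PySem.List.pyRange (m - 1) (-1) (-1) := by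
  rw [PySem.List.pyRange_neg_one, PySem.List.pyRange_neg_one]
  have h1 : (m - -1).toNat = (m - 1 - -1).toNat + 1 := by omega
  rw [h1, List.range_succ_eq_map]
  simp only [List.map_cons, List.map_map]
  congr 1
  · norm_num
  · apply List.map_congr_left
    intro a _
    simp only [Function.comp_apply, Nat.succ_eq_add_one]
    push_cast
    ring

theorem pv_foldl_countdown {α : Type} (g : Int → List α) :
    ∀ (n : Nat) (m : Int), m + 1 = (n : Int) → ∀ (init : List α),
      (PySem.List.pyRange m (-1) (-1)).foldl (fun acc s => acc ++ g s) init = init ++ pvFL g n := by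
  intro n
  induction n with
  | zero =>
    intro m hm init
    have : m = -1 := by omega
    subst this
    rw [PySem.List.pyRange_neg_one]
    simp [pvFL]
  | succ n ih =>
    intro m hm init
    have hm' : m = (n : Int) := by omega
    rw [pv_pyRange_countdown m (by omega)]
    simp only [List.foldl_cons]
    rw [ih (m - 1) (by omega)]
    simp [pvFL, hm', List.append_assoc]

-- insertBy passes over a prefix it does not go before
theorem pv_insertBy_prefix {α : Type} (before : α → α → Bool) (x : α) :
    ∀ (as bs : List α), (∀ y ∈ as, before x y = false) →
      PySem.List.insertBy before x (as ++ bs) = as ++ PySem.List.insertBy before x bs := by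
  intro as
  induction as with
  | nil => intro bs _; simp
  | cons a t ih =>
    intro bs h
    have ha : before x a = false := h a (by simp)
    simp only [List.cons_append, PySem.List.insertBy, ha]
    simp only [Bool.false_eq_true, if_false]
    rw [ih bs (fun y hy => h y (by simp [hy]))]

theorem pv_insertBy_front {α : Type} (before : α → α → Bool) (x : α) :
    ∀ (bs : List α), (∀ y ∈ bs, before x y = true) →
      PySem.List.insertBy before x bs = x :: bs := by
  intro bs h
  cases bs with
  | nil => rfl
  | cons y t => simp [PySem.List.insertBy, h y (by simp)]

-- descending buckets of a pair list
def pvG (xs : List (Int × String)) (n : Nat) : List (Int × String) :=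
  pvFL (fun s => xs.filter (fun p => p.1 == s)) n

theorem pvFL_succ {α : Type} (g : Int → List α) (n : Nat) :
    pvFL g (n + 1) = g (n : Int) ++ pvFL g n := rfl

theorem pvG_succ (xs : List (Int × String)) (n : Nat) :
    pvG xs (n + 1) = xs.filter (fun p => p.1 == ((n : Nat) : Int)) ++ pvG xs n := rfl

theorem pvG_nil : ∀ n, pvG [] n = [] := by
  intro n
  induction n with
  | zero => rfl
  | succ n ih => rw [pvG_succ]; simp [ih]

theorem pvG_key_lt : ∀ (n : Nat) (xs : List (Int × String)) (p : Int × String),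
    p ∈ pvG xs n → p.1 < (n : Int) := by
  intro n
  induction n with
  | zero => intro xs p hp; simp [pvG, pvFL] at hp
  | succ n ih =>
    intro xs p hp
    rw [pvG_succ] at hp
    rcases List.mem_append.mp hp with hp | hp
    · have h1 : p.1 = (n : Int) := by simpa using (List.mem_filter.mp hp).2
      push_cast
      omega
    · have := ih xs p hp
      push_cast
      omega

theorem pvG_append_high : ∀ (n : Nat) (xs : List (Int × String)) (x : Int × String),
    (n : Int) ≤ x.1 → pvG (xs ++ [x]) n = pvG xs n := by
  intro n
  induction n with
  | zero => intro xs x _; rfl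
  | succ n ih =>
    intro xs x hx
    rw [pvG_succ, pvG_succ, List.filter_append,
      ih xs x (by push_cast at hx ⊢; omega)]
    have hne : (x.1 == ((n : Nat) : Int)) = false := by
      have : x.1 ≠ (n : Int) := by push_cast at hx ⊢; omega
      simpa using this
    simp [hne]

theorem pv_insert_G : ∀ (n : Nat) (xs : List (Int × String)) (x : Int × String),
    0 ≤ x.1 → x.1 < (n : Int) →
      PySem.List.insertBy (fun a b => decide (b.1 < a.1)) x (pvG xs n) = pvG (xs ++ [x]) n := by
  intro n
  induction n with
  | zero => intro xs x h0 hn; simp at hn; omega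
  | succ n ih =>
    intro xs x h0 hn
    rw [pvG_succ, pvG_succ]
    have hpre : ∀ y ∈ xs.filter (fun p => p.1 == ((n : Nat) : Int)),
        (fun a b => decide (b.1 < a.1)) x y = false := by
      intro y hy
      have hy1 : y.1 = (n : Int) := by simpa using (List.mem_filter.mp hy).2
      simp only [decide_eq_false_iff_not, not_lt, hy1]
      push_cast at hn ⊢
      omega
    rw [pv_insertBy_prefix _ _ _ _ hpre]
    by_cases hx : x.1 = (n : Int)
    · have hfront : ∀ y ∈ pvG xs n, (fun a b => decide (b.1 < a.1)) x y = true := by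
        intro y hy
        have := pvG_key_lt n xs y hy
        simp only [decide_eq_true_eq, hx]
        exact this
      rw [pv_insertBy_front _ _ _ hfront]
      rw [pvG_append_high n xs x (le_of_eq hx.symm)]
      rw [List.filter_append]
      have hxq : (x.1 == ((n : Nat) : Int)) = true := by simpa using hx
      simp [hxq]
    · have hx' : x.1 < (n : Int) := by push_cast at hn ⊢; omega
      rw [ih xs x h0 hx']
      rw [List.filter_append]
      have hxq : (x.1 == ((n : Nat) : Int)) = false := by simpa using hx
      simp [hxq]

theorem pv_sorted_eq_G (n : Nat) :
    ∀ (xs : List (Int × String)), (∀ p ∈ xs, 0 ≤ p.1 ∧ p.1 < (n : Int)) →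
      PySem.List.sorted xs (fun p => p.1) true = pvG xs n := by
  intro xs
  induction xs using List.reverseRecOn with
  | nil => intro _; rw [PySem.List.sorted_rev_eq_foldl_insertBy]; simp [pvG_nil]
  | append_singleton xs x ih =>
    intro h
    rw [PySem.List.sorted_rev_eq_foldl_insertBy] at *
    rw [List.foldl_append]
    simp only [List.foldl_cons, List.foldl_nil]
    rw [ih (fun p hp => h p (by simp [hp]))]
    have hx := h x (by simp)
    exact pv_insert_G n xs x hx.1 hx.2

theorem pv_map_snd_G (eds : List String) (k : String → Int) :
    ∀ (n : Nat), (pvG (eds.map (fun e => (k e, e))) n).map (fun p => p.2) =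
      pvFL (fun s => eds.filter (fun e => k e == s)) n := by
  intro n
  induction n with
  | zero => rfl
  | succ n ih =>
    rw [pvG_succ, pvFL_succ, List.map_append, ih]
    congr 1
    rw [List.filter_map, List.map_map]
    have h1 : ((fun (p : Int × String) => p.2) ∘ fun e => (k e, e)) = id := rfl
    rw [h1, List.map_id]
    rfl

-- the whole equivalence, for an arbitrary nonnegative scoring function
theorem pv_main (eds : List String) (k : String → Int) (hk : ∀ e, 0 ≤ k e) :
    (PySem.List.slice
        (PySem.List.sorted (eds.foldl (fun acc exp => acc ++ [(k exp, exp)]) ([] : List (Int × String)))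
          (fun x => x.1) true) none (some 4)).map (fun p => p.2) =
      PySem.List.slice
        ((PySem.List.pyRange
            (eds.foldl (fun (st : PySem.Dict Int (List String) × Int) exp =>
                (st.1.insert (k exp) (st.1.getD (k exp) [] ++ [exp]),
                 if st.2 < k exp then k exp else st.2)) (PySem.Dict.empty, 0)).2
            (-1) (-1)).foldl
          (fun acc s => acc ++
            (eds.foldl (fun (st : PySem.Dict Int (List String) × Int) exp =>
                (st.1.insert (k exp) (st.1.getD (k exp) [] ++ [exp]),
                 if st.2 < k exp then k exp else st.2)) (PySem.Dict.empty, 0)).1.getD s [])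
          ([] : List String)) none (some 4) := by
  rw [PySem.List.foldl_append_singleton_eq_map (fun e => (k e, e)) eds []]
  simp only [List.nil_append]
  rw [pv_foldl_pair (fun (d : PySem.Dict Int (List String)) e =>
        d.insert (k e) (d.getD (k e) [] ++ [e]))
      (fun m e => if m < k e then k e else m) eds PySem.Dict.empty 0]
  dsimp only
  set D := eds.foldl (fun (d : PySem.Dict Int (List String)) e =>
    d.insert (k e) (d.getD (k e) [] ++ [e])) PySem.Dict.empty with hD
  set m := eds.foldl (fun m e => if m < k e then k e else m) 0 with hm
  have hm0 : 0 ≤ m := by rw [hm]; exact pv_le_foldl_max k eds 0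
  set n : Nat := (m + 1).toNat with hn
  have hmn : m + 1 = (n : Int) := by omega
  rw [pv_foldl_countdown (fun s => D.getD s []) n m hmn []]
  simp only [List.nil_append]
  have hbucket : (fun s => D.getD s []) = fun s => eds.filter (fun e => k e == s) := by
    funext s
    rw [hD, pv_bucket k eds PySem.Dict.empty s, PySem.Dict.getD_empty]
    simp
  rw [hbucket]
  have hbounds : ∀ p ∈ eds.map (fun e => (k e, e)), 0 ≤ p.1 ∧ p.1 < (n : Int) := by
    intro p hp
    rcases List.mem_map.mp hp with ⟨e, he, rfl⟩
    refine ⟨hk e, ?_⟩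
    have h2 : k e ≤ m := by rw [hm]; exact pv_mem_le_foldl_max k eds 0 e he
    omega
  rw [pv_sorted_eq_G n (eds.map (fun e => (k e, e))) hbounds]
  rw [PySem.List.slice_to _ (by norm_num), PySem.List.slice_to _ (by norm_num)]
  rw [List.map_take]
  rw [pv_map_snd_G eds k n]

-- ===== VERDICT (by name: the statement is the Claim_ definition above) =====
theorem select_relevant_experience_py_spec : Claim_equal_select_relevant_experience_py := by
  intro eds js _
  show select_relevant_experience_py eds js = select_relevant_experience_py_alt eds js
  exact pv_main eds
    (fun e => pvScoreOf (PySem.Set.ofList (js.map (fun s => PySem.Str.lower s))) (PySem.Str.lower e))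
    (fun e => pv_score_nonneg _ _)
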